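-- pv_equiv track=rewrite | github.com/YuJinUk/Algorithm | 프로그래머스/lv0/120878. 유한소수 판별하기/유한소수 판별하기.py | check
-- ===== SOURCE A (Python) =====
-- def check(x):
--     while True:
--         mok, mod = divmod(x, 2)
--         if mod:
--             break
--         x = mok
--     while True:
--         mok, mod = divmod(x, 5)
--         if mod:
--             break
--         x = mok
--     return x
-- ===== SOURCE B (Python) =====
-- def check(x):
--     # gcd-driven stripping: each round divides out all factors of 2 and 5
--     # currently present (gcd with 10), instead of two separate peel loops.
--     while True:
--         a, b = abs(x), 10
--         while b:
--             a, b = b, a % b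
--         if a == 1:
--             break
--         x //= a
--     return x
-- ===== Notes on version B (the rewrite author's own statement) =====
-- stated objective: alternative
-- what changed: Replaces the two divmod peel loops (first all 2s, then all 5s) with a single gcd-driven loop: repeatedly compute g = gcd(|x|, 10) by Euclid and divide x by g until g = 1.
import Mathlib
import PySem

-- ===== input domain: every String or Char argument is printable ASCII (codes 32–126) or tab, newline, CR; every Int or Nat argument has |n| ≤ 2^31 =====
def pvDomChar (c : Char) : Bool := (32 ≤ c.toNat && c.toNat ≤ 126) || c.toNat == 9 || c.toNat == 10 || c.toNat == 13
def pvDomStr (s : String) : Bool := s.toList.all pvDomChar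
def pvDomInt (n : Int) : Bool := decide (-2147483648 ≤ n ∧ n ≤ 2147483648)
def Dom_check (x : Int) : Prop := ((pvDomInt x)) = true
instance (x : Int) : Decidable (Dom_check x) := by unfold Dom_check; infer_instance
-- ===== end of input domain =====

-- B replaces A's two divmod peel loops with one gcd-driven loop; same value on every nonzero int (both diverge at x = 0).

-- termination helper cited by the ports' decreasing_by
theorem natAbs_ediv_lt_pv (g x : Int) (hg : 2 ≤ g) (hd : g ∣ x) (hx : x ≠ 0) :
    (x / g).natAbs < x.natAbs := by
  obtain ⟨k, rfl⟩ := hd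
  rw [Int.mul_ediv_cancel_left _ (by omega)]
  have hk0 : k ≠ 0 := fun h => hx (by simp [h])
  rw [Int.natAbs_mul]
  have h1 : 1 ≤ k.natAbs := Int.natAbs_pos.mpr hk0
  have h2 : 2 ≤ g.natAbs := by omega
  calc k.natAbs < 2 * k.natAbs := by omega
    _ ≤ g.natAbs * k.natAbs := Nat.mul_le_mul_right _ h2

-- ===== PORT A =====
-- while True: mok, mod = divmod(x, 2); if mod: break; x = mok
-- (divisor 2 is positive, so Python's floor div/mod coincide with Lean's Int '/' '%';
--  the 'x ≠ 0' part of the guard only makes the loop total at x = 0, where Python diverges)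
def peel2 (x : Int) : Int :=
  if h : x % 2 = 0 ∧ x ≠ 0 then peel2 (x / 2) else x
  termination_by x.natAbs
  decreasing_by exact natAbs_ediv_lt_pv 2 x (by omega) (by omega) h.2

-- while True: mok, mod = divmod(x, 5); if mod: break; x = mok
def peel5 (x : Int) : Int :=
  if h : x % 5 = 0 ∧ x ≠ 0 then peel5 (x / 5) else x
  termination_by x.natAbs
  decreasing_by exact natAbs_ediv_lt_pv 5 x (by omega) (by omega) h.2

def check (x : Int) : Int := peel5 (peel2 x)

-- ===== PORT B =====
-- inner Euclid loop of Source B: a, b = abs(x), 10; while b: a, b = b, a % b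
def egcd (a b : Nat) : Nat :=
  if hb : b = 0 then a else egcd b (a % b)
  termination_by b
  decreasing_by exact Nat.mod_lt _ (Nat.pos_of_ne_zero hb)

-- cited by gloop's decreasing_by: the hand-written Euclid loop computes the gcd
theorem egcd_eq_gcd : ∀ b a : Nat, egcd a b = Nat.gcd a b := by
  intro b
  induction b using Nat.strong_induction_on with
  | _ b ih =>
    intro a
    rw [egcd]
    by_cases hb : b = 0
    · simp [hb]
    · rw [dif_neg hb, ih (a % b) (Nat.mod_lt _ (Nat.pos_of_ne_zero hb))]
      rw [Nat.gcd_comm b (a % b), ← Nat.gcd_rec b a, Nat.gcd_comm b a]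

-- outer loop of Source B: if a == 1: break; x //= a  (the 'x ≠ 0' part of the guard only
-- totalizes x = 0, where Python diverges; the divisor is positive, so '//' is Lean '/')
def gloop (x : Int) : Int :=
  let g : Int := (egcd x.natAbs 10 : Nat)
  if h : g ≠ 1 ∧ x ≠ 0 then gloop (x / g) else x
  termination_by x.natAbs
  decreasing_by
    have h10 : Nat.gcd x.natAbs 10 ∣ 10 := Nat.gcd_dvd_right _ _
    have hpos : 0 < Nat.gcd x.natAbs 10 := Nat.pos_of_dvd_of_pos h10 (by norm_num)
    have hne : Nat.gcd x.natAbs 10 ≠ 1 := by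
      intro hc
      refine h.1 ?_
      show ((egcd x.natAbs 10 : Nat) : Int) = 1
      simp [egcd_eq_gcd, hc]
    show (x / ((egcd x.natAbs 10 : Nat) : Int)).natAbs < x.natAbs
    simp only [egcd_eq_gcd]
    refine natAbs_ediv_lt_pv _ x ?_ ?_ h.2
    · exact_mod_cast (show 2 ≤ Nat.gcd x.natAbs 10 by omega)
    · exact dvd_trans (Int.natCast_dvd_natCast.mpr (Nat.gcd_dvd_left _ _)) (Int.natAbs_dvd.mpr dvd_rfl)

def check_alt (x : Int) : Int := gloop x

-- ===== PRECONDITION & SPEC =====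
-- Pre_ excludes x = 0, on which both Python programs loop forever (no value is returned).
def Pre_check (x : Int) : Prop := x ≠ 0
instance (x : Int) : Decidable (Pre_check x) := by unfold Pre_check; infer_instance
def pvWitness_check : Int := 12

def Spec_check (x : Int) (out : Int) : Prop := out = check_alt x
instance (x : Int) (out : Int) : Decidable (Spec_check x out) := by unfold Spec_check; infer_instance

-- ===== CLAIM (what is proved, stated in full; the proofs are below) =====
def Claim_equal_check : Prop := ∀ (x : Int), Dom_check x → Pre_check x → Spec_check x (check x)

-- ===== LEMMAS AND PROOFS =====

theorem peel2_ne_zero : ∀ n : Nat, ∀ x : Int, x.natAbs ≤ n → x ≠ 0 → peel2 x ≠ 0 := by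
  intro n
  induction n with
  | zero => intro x hle hx; exact absurd (by omega : x = 0) hx
  | succ n ih =>
    intro x hle hx
    rw [peel2]
    by_cases h : x % 2 = 0 ∧ x ≠ 0
    · rw [dif_pos h]
      have hlt := natAbs_ediv_lt_pv 2 x (by omega) (by omega) hx
      have hne : x / 2 ≠ 0 := by
        obtain ⟨k, rfl⟩ : (2:Int) ∣ x := by omega
        rw [Int.mul_ediv_cancel_left _ (by omega)]
        intro hc; exact hx (by simp [hc])
      exact ih (x / 2) (by omega) hne
    · rw [dif_neg h]; exact hx

theorem peel2_five_mul : ∀ n : Nat, ∀ x : Int, x.natAbs ≤ n → x ≠ 0 →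
    peel2 (5 * x) = 5 * peel2 x := by
  intro n
  induction n with
  | zero => intro x hle hx; exact absurd (by omega : x = 0) hx
  | succ n ih =>
    intro x hle hx
    by_cases h : x % 2 = 0
    · obtain ⟨k, rfl⟩ : (2:Int) ∣ x := by omega
      have hk : k ≠ 0 := fun hc => hx (by simp [hc])
      have hle' : k.natAbs ≤ n := by simp [Int.natAbs_mul] at hle; omega
      rw [peel2, dif_pos ⟨by omega, by intro hc; omega⟩]
      rw [show (5 : Int) * (2 * k) / 2 = 5 * k by omega]
      rw [ih k hle' hk]
      conv_rhs => rw [peel2]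
      rw [dif_pos ⟨by omega, hx⟩]
      rw [show (2 : Int) * k / 2 = k by omega]
    · rw [peel2, dif_neg (by intro hc; omega)]
      conv_rhs => rw [peel2]
      rw [dif_neg (by intro hc; omega)]

theorem gcd10_dvd2 (m : Nat) (h : 2 ∣ m) : 2 ∣ Nat.gcd m 10 := Nat.dvd_gcd h (by norm_num)
theorem gcd10_dvd5 (m : Nat) (h : 5 ∣ m) : 5 ∣ Nat.gcd m 10 := Nat.dvd_gcd h (by norm_num)

theorem dvd10_mem (g : Nat) (h : g ∣ 10) : g = 1 ∨ g = 2 ∨ g = 5 ∨ g = 10 := by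
  have h1 : 0 < g := Nat.pos_of_dvd_of_pos h (by norm_num)
  have h2 : g ≤ 10 := Nat.le_of_dvd (by norm_num) h
  interval_cases g <;> omega

theorem gcd10_mem (m : Nat) : Nat.gcd m 10 = 1 ∨ Nat.gcd m 10 = 2 ∨ Nat.gcd m 10 = 5 ∨ Nat.gcd m 10 = 10 :=
  dvd10_mem _ (Nat.gcd_dvd_right _ _)

theorem dvd2_natAbs (x : Int) : 2 ∣ x.natAbs ↔ x % 2 = 0 := by omega
theorem dvd5_natAbs (x : Int) : 5 ∣ x.natAbs ↔ x % 5 = 0 := by omega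

theorem gcd10_val (x : Int) :
    (x % 2 = 0 → x % 5 = 0 → Nat.gcd x.natAbs 10 = 10) ∧
    (x % 2 = 0 → ¬ x % 5 = 0 → Nat.gcd x.natAbs 10 = 2) ∧
    (¬ x % 2 = 0 → x % 5 = 0 → Nat.gcd x.natAbs 10 = 5) ∧
    (¬ x % 2 = 0 → ¬ x % 5 = 0 → Nat.gcd x.natAbs 10 = 1) := by
  have hmem := gcd10_mem x.natAbs
  have hg2 : x % 2 = 0 → 2 ∣ Nat.gcd x.natAbs 10 := fun h => gcd10_dvd2 _ ((dvd2_natAbs x).mpr h)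
  have hg5 : x % 5 = 0 → 5 ∣ Nat.gcd x.natAbs 10 := fun h => gcd10_dvd5 _ ((dvd5_natAbs x).mpr h)
  have hb2 : 2 ∣ Nat.gcd x.natAbs 10 → x % 2 = 0 := fun h =>
    (dvd2_natAbs x).mp (Nat.dvd_trans h (Nat.gcd_dvd_left _ _))
  have hb5 : 5 ∣ Nat.gcd x.natAbs 10 → x % 5 = 0 := fun h =>
    (dvd5_natAbs x).mp (Nat.dvd_trans h (Nat.gcd_dvd_left _ _))
  refine ⟨?_, ?_, ?_, ?_⟩ <;> intro h1 h2
  · have a2 := hg2 h1; have a5 := hg5 h2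
    rcases hmem with h | h | h | h <;> omega
  · have a2 := hg2 h1
    have c5 : ¬ 5 ∣ Nat.gcd x.natAbs 10 := fun d => h2 (hb5 d)
    rcases hmem with h | h | h | h <;> omega
  · have a5 := hg5 h2
    have c2 : ¬ 2 ∣ Nat.gcd x.natAbs 10 := fun d => h1 (hb2 d)
    rcases hmem with h | h | h | h <;> omega
  · have c2 : ¬ 2 ∣ Nat.gcd x.natAbs 10 := fun d => h1 (hb2 d)
    have c5 : ¬ 5 ∣ Nat.gcd x.natAbs 10 := fun d => h2 (hb5 d)
    rcases hmem with h | h | h | h <;> omega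

theorem gloop_eq_peels : ∀ n : Nat, ∀ x : Int, x.natAbs ≤ n → x ≠ 0 →
    gloop x = peel5 (peel2 x) := by
  intro n
  induction n with
  | zero => intro x hle hx; exact absurd (by omega : x = 0) hx
  | succ n ih =>
    intro x hle hx
    obtain ⟨hA, hB, hC, hD⟩ := gcd10_val x
    rw [gloop]
    simp only [egcd_eq_gcd]
    by_cases h2 : x % 2 = 0 <;> by_cases h5 : x % 5 = 0
    · -- g = 10
      rw [hA h2 h5]
      obtain ⟨m, rfl⟩ : (10:Int) ∣ x := by omega
      have hm : m ≠ 0 := fun hc => hx (by simp [hc])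
      have hle' : m.natAbs ≤ n := by simp [Int.natAbs_mul] at hle; omega
      rw [dif_pos ⟨by norm_num, hx⟩]
      rw [show ((10 : Nat) : Int) = 10 from rfl, show (10 : Int) * m / 10 = m by omega]
      rw [ih m hle' hm]
      conv_rhs => rw [peel2]
      rw [dif_pos ⟨by omega, hx⟩]
      rw [show (10 : Int) * m / 2 = 5 * m by omega]
      rw [peel2_five_mul m.natAbs m le_rfl hm]
      have hs : peel2 m ≠ 0 := peel2_ne_zero m.natAbs m le_rfl hm
      conv_rhs => rw [peel5]
      rw [dif_pos ⟨by omega, by intro hc; rcases mul_eq_zero.mp hc with h | h <;> omega⟩]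
      rw [show (5 : Int) * peel2 m / 5 = peel2 m by omega]
    · -- g = 2
      rw [hB h2 h5]
      obtain ⟨k, rfl⟩ : (2:Int) ∣ x := by omega
      have hk : k ≠ 0 := fun hc => hx (by simp [hc])
      have hle' : k.natAbs ≤ n := by simp [Int.natAbs_mul] at hle; omega
      rw [dif_pos ⟨by norm_num, hx⟩]
      rw [show ((2 : Nat) : Int) = 2 from rfl, show (2 : Int) * k / 2 = k by omega]
      rw [ih k hle' hk]
      conv_rhs => rw [peel2]
      rw [dif_pos ⟨by omega, hx⟩]
      rw [show (2 : Int) * k / 2 = k by omega]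
    · -- g = 5
      rw [hC h2 h5]
      obtain ⟨k, rfl⟩ : (5:Int) ∣ x := by omega
      have hk : k ≠ 0 := fun hc => hx (by simp [hc])
      have hle' : k.natAbs ≤ n := by simp [Int.natAbs_mul] at hle; omega
      rw [dif_pos ⟨by norm_num, hx⟩]
      rw [show ((5 : Nat) : Int) = 5 from rfl, show (5 : Int) * k / 5 = k by omega]
      rw [ih k hle' hk]
      have hkodd : ¬ k % 2 = 0 := by omega
      conv_rhs => rw [peel2]
      rw [dif_neg (by intro hc; omega)]
      conv_lhs => rw [peel2]
      rw [dif_neg (by intro hc; omega)]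
      conv_rhs => rw [peel5]
      rw [dif_pos ⟨by omega, hx⟩]
      rw [show (5 : Int) * k / 5 = k by omega]
    · -- g = 1
      rw [hD h2 h5]
      rw [dif_neg (by simp)]
      rw [peel2, dif_neg (by intro hc; omega)]
      rw [peel5, dif_neg (by intro hc; omega)]

-- ===== VERDICT (by name: the statement is the Claim_ definition above) =====
theorem check_spec : Claim_equal_check := by
  intro x _ hpre
  unfold Spec_check check check_alt
  exact (gloop_eq_peels x.natAbs x le_rfl hpre).symm
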